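-- pv_equiv track=rewrite | github.com/ErikCohenDev/advent-of-code-2023 | day1.py | split_text_on_digits
-- ===== SOURCE A (Python) =====
-- def split_text_on_digits(text):
--     temp_check_if_number_string = ""
--     split_on_digits = []
--     for char in text:
--         if char.isdigit():
--             if len(temp_check_if_number_string) > 0:
--                 split_on_digits.append(temp_check_if_number_string)
--                 temp_check_if_number_string = ""
--             split_on_digits.append(char)
--         else:
--             temp_check_if_number_string += char
--     if len(temp_check_if_number_string) > 0:
--         split_on_digits.append(temp_check_if_number_string)
--     return split_on_digits
-- ===== SOURCE B (Python) =====
-- from itertools import groupby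
--
-- def split_text_on_digits(text):
--     result = []
--     for is_digit, group in groupby(text, key=str.isdigit):
--         if is_digit:
--             result.extend(group)
--         else:
--             result.append("".join(group))
--     return result
-- ===== Notes on version B (the rewrite author's own statement) =====
-- stated objective: idiomatic
-- what changed: Replaces the manual temp-string accumulator with flush logic by a single itertools.groupby pass over digit/non-digit runs (extend digit groups, join non-digit groups).
import Mathlib
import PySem

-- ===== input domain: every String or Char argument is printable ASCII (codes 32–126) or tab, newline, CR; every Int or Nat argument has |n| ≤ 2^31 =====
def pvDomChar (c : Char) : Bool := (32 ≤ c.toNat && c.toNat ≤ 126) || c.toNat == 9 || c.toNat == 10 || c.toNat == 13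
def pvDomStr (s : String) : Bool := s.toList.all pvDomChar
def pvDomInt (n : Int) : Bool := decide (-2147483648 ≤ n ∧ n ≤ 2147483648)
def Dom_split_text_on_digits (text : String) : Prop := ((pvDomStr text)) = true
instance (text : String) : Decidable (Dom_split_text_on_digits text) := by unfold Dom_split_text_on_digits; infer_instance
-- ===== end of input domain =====

-- B replaces A's manual temp-accumulator/flush loop by one itertools.groupby pass over
-- digit/non-digit runs (digit groups flattened, non-digit groups joined); same O(n) cost.

-- ===== PORT A =====
-- A's for-loop, step for step: state = (temp_check_if_number_string, split_on_digits).
def splitLoopA (cs : List Char) (temp : List Char) (acc : List String) : List String :=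
  match cs with
  | [] => if temp.length > 0 then acc ++ [String.ofList temp] else acc
  | c :: rest =>
    if PySem.Chars.isdigit c then
      splitLoopA rest []
        ((if temp.length > 0 then acc ++ [String.ofList temp] else acc) ++ [String.ofList [c]])
    else
      splitLoopA rest (temp ++ [c]) acc

def split_text_on_digits (text : String) : List String :=
  splitLoopA text.toList [] []

-- ===== PORT B =====
-- B's groupby loop: each step takes the maximal run with the head's digit-class
-- (the group), emits singletons for a digit run (extend) / the joined run (append).
def splitRunsB (cs : List Char) : List String :=
  match cs with
  | [] => []
  | c :: rest =>
    (if PySem.Chars.isdigit c then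
        (c :: rest.takeWhile (fun d => PySem.Chars.isdigit d == PySem.Chars.isdigit c)).map
          (fun d => String.ofList [d])
      else
        [String.ofList
          (c :: rest.takeWhile (fun d => PySem.Chars.isdigit d == PySem.Chars.isdigit c))])
      ++ splitRunsB (rest.dropWhile (fun d => PySem.Chars.isdigit d == PySem.Chars.isdigit c))
termination_by cs.length
decreasing_by exact Nat.lt_succ_of_le (List.length_dropWhile_le _ _)

def split_text_on_digits_alt (text : String) : List String :=
  splitRunsB text.toList

-- ===== PRECONDITION & SPEC =====
def Spec_split_text_on_digits (text : String) (out : List String) : Prop := out = split_text_on_digits_alt text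
instance (text : String) (out : List String) : Decidable (Spec_split_text_on_digits text out) := by unfold Spec_split_text_on_digits; infer_instance

-- ===== CLAIM (what is proved, stated in full; the proofs are below) =====
def Claim_equal_split_text_on_digits : Prop := ∀ (text : String), Dom_split_text_on_digits text → Spec_split_text_on_digits text (split_text_on_digits text)

-- ===== LEMMAS AND PROOFS =====

theorem splitRunsB_nil : splitRunsB [] = [] := by
  rw [splitRunsB]

theorem splitRunsB_cons (c : Char) (rest : List Char) :
    splitRunsB (c :: rest) =
      (if PySem.Chars.isdigit c then
          (c :: rest.takeWhile (fun d => PySem.Chars.isdigit d == PySem.Chars.isdigit c)).map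
            (fun d => String.ofList [d])
        else
          [String.ofList
            (c :: rest.takeWhile (fun d => PySem.Chars.isdigit d == PySem.Chars.isdigit c))])
        ++ splitRunsB (rest.dropWhile (fun d => PySem.Chars.isdigit d == PySem.Chars.isdigit c)) := by
  rw [splitRunsB]

-- On a digit head, peeling the digit run one singleton at a time agrees with
-- emitting the whole group at once.
theorem splitRunsB_digit_split (cs : List Char) :
    (cs.takeWhile (fun d => PySem.Chars.isdigit d)).map (fun d => String.ofList [d])
      ++ splitRunsB (cs.dropWhile (fun d => PySem.Chars.isdigit d)) = splitRunsB cs := by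
  cases cs with
  | nil => simp [splitRunsB_nil]
  | cons c rest =>
    by_cases h : PySem.Chars.isdigit c
    · rw [splitRunsB_cons]
      simp [h]
    · simp only [List.takeWhile_cons, List.dropWhile_cons, h]
      simp

-- Loop invariant: A's loop from state (temp, acc) appends, after acc, the pending
-- non-digit run merged with the following non-digit characters, then B's runs of the rest.
theorem splitLoopA_eq (cs : List Char) : ∀ (temp : List Char) (acc : List String),
    splitLoopA cs temp acc =
      acc ++ (if temp.isEmpty then splitRunsB cs
        else String.ofList (temp ++ cs.takeWhile (fun d => !PySem.Chars.isdigit d))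
          :: splitRunsB (cs.dropWhile (fun d => !PySem.Chars.isdigit d))) := by
  induction cs with
  | nil =>
    intro temp acc
    cases temp with
    | nil => simp [splitLoopA, splitRunsB_nil]
    | cons t ts => simp [splitLoopA, splitRunsB_nil]
  | cons c rest ih =>
    intro temp acc
    by_cases h : PySem.Chars.isdigit c
    · rw [splitLoopA]
      simp only [h, if_pos]
      rw [ih [] _]
      have hrun : splitRunsB (c :: rest)
          = String.ofList [c] :: ((rest.takeWhile (fun d => PySem.Chars.isdigit d)).map
              (fun d => String.ofList [d])
            ++ splitRunsB (rest.dropWhile (fun d => PySem.Chars.isdigit d))) := by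
        rw [splitRunsB_cons]
        simp [h]
      cases temp with
      | nil =>
        simp only [List.isEmpty_nil, if_pos, List.length_nil]
        rw [hrun, splitRunsB_digit_split]
        simp
      | cons t ts =>
        simp only [List.isEmpty_cons, Bool.false_eq_true, List.length_cons]
        simp [h]
        rw [hrun, splitRunsB_digit_split]
    · rw [splitLoopA]
      simp only [h, Bool.false_eq_true, not_false_iff, if_neg]
      rw [ih (temp ++ [c]) acc]
      cases temp with
      | nil =>
        simp only [List.isEmpty_nil, if_pos, List.nil_append, List.isEmpty_cons,
          Bool.false_eq_true]
        rw [splitRunsB_cons]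
        simp [h]
      | cons t ts =>
        simp only [List.isEmpty_cons, Bool.false_eq_true]
        simp [h]

-- ===== VERDICT (by name: the statement is the Claim_ definition above) =====
theorem split_text_on_digits_spec : Claim_equal_split_text_on_digits := by
  intro text _
  unfold Spec_split_text_on_digits split_text_on_digits split_text_on_digits_alt
  rw [splitLoopA_eq]
  simp
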